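-- pv_equiv track=rewrite | github.com/aalkaswan/AdventOfCode24 | day13-1/solution.py | parse
-- ===== SOURCE A (Python) =====
-- def parse(lines):
--     # return list of 2d array of chars
--     res = []
--     grid = []
--     for line in lines:
--         if line.strip() == '':
--             res.append(grid)
--             grid = []
--         else:
--             grid.append(list(line))
--     # split list after each double newline
--     res.append(grid)
--     return res
-- ===== SOURCE B (Python) =====
-- def parse(lines):
--     # blank-separator index table + slicing, instead of a running accumulator
--     blanks = [i for i, l in enumerate(lines) if l.strip() == '']
--     bounds = [-1] + blanks + [len(lines)]
--     return [[list(l) for l in lines[b + 1:c]] for b, c in zip(bounds, bounds[1:])]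
-- ===== Notes on version B (the rewrite author's own statement) =====
-- stated objective: alternative
-- what changed: Replaced the single loop with a flushed running accumulator by a separator-index pass: collect the indices of blank lines, form a boundary table, and build each group by slicing between consecutive boundaries.
import Mathlib
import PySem

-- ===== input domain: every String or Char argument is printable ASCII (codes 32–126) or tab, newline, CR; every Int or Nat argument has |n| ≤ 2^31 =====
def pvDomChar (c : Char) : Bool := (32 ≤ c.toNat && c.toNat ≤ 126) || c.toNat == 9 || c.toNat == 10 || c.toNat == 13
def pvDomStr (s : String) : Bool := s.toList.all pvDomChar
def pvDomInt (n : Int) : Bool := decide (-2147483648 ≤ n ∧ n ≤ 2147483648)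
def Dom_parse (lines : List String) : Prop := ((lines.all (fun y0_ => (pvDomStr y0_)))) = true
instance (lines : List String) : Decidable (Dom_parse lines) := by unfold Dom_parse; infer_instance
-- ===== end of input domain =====

-- B replaces A's flush-on-blank accumulator loop by a blank-index table and slicing between consecutive boundaries; same cost.

-- ===== PORT A =====
-- list(line): the list of one-character strings of line
def pvChars (line : String) : List String := line.toList.map (fun c => String.ofList [c])

-- the body of A's for-loop, over the state (res, grid)
def parseStep (st : List (List (List String)) × List (List String)) (line : String) :
    List (List (List String)) × List (List String) :=
  if PySem.Str.strip line = "" then (st.1 ++ [st.2], [])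
  else (st.1, st.2 ++ [pvChars line])

def parse (lines : List String) : List (List (List String)) :=
  let st := lines.foldl parseStep ([], [])
  st.1 ++ [st.2]

-- ===== PORT B =====
def parse_alt (lines : List String) : List (List (List String)) :=
  let blanks : List Int :=
    ((PySem.List.enumerate lines 0).filter (fun p => PySem.Str.strip p.2 == "")).map (·.1)
  let bounds : List Int := -1 :: (blanks ++ [(lines.length : Int)])
  (bounds.zip bounds.tail).map
    (fun bc => (PySem.List.slice lines (some (bc.1 + 1)) (some bc.2)).map pvChars)

-- ===== PRECONDITION & SPEC =====
def Spec_parse (lines : List String) (out : List (List (List String))) : Prop := out = parse_alt lines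
instance (lines : List String) (out : List (List (List String))) : Decidable (Spec_parse lines out) := by unfold Spec_parse; infer_instance

-- ===== CLAIM (what is proved, stated in full; the proofs are below) =====
def Claim_equal_parse : Prop := ∀ (lines : List String), Dom_parse lines → Spec_parse lines (parse lines)

-- ===== LEMMAS AND PROOFS =====

-- proof-side recursive characterisation both ports are reduced to
def spl : List String → List (List (List String))
  | [] => [[]]
  | l :: ls =>
    if PySem.Str.strip l = "" then [] :: spl ls
    else (pvChars l :: (spl ls).headI) :: (spl ls).tail

theorem spl_ne_nil (ls : List String) : spl ls ≠ [] := by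
  cases ls with
  | nil => simp [spl]
  | cons l ls => simp only [spl]; split <;> simp

-- A's loop invariant: folding from (res, grid) prepends grid onto the head group of spl
theorem parse_foldl (ls : List String)
    (res : List (List (List String))) (grid : List (List String)) :
    (ls.foldl parseStep (res, grid)).1 ++ [(ls.foldl parseStep (res, grid)).2]
      = res ++ ((grid ++ (spl ls).headI) :: (spl ls).tail) := by
  induction ls generalizing res grid with
  | nil => simp [spl]
  | cons l ls ih =>
    simp only [List.foldl_cons, parseStep, spl]
    split
    · rw [ih]
      cases hc : spl ls with
      | nil => exact absurd hc (spl_ne_nil ls)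
      | cons g gs => simp
    · rw [ih]; simp

theorem parse_eq_spl (lines : List String) : parse lines = spl lines := by
  unfold parse
  have h := parse_foldl lines [] []
  simp only [List.nil_append] at h
  rw [h]
  cases hc : spl lines with
  | nil => exact absurd hc (spl_ne_nil lines)
  | cons g gs => simp

-- B side
def blanksI (xs : List String) : List Int :=
  ((PySem.List.enumerate xs 0).filter (fun p => PySem.Str.strip p.2 == "")).map (·.1)

def grps (xs : List String) (bs : List Int) : List (List (List String)) :=
  (bs.zip bs.tail).map
    (fun bc => (PySem.List.slice xs (some (bc.1 + 1)) (some bc.2)).map pvChars)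

theorem parse_alt_eq_grps (xs : List String) :
    parse_alt xs = grps xs (-1 :: (blanksI xs ++ [(xs.length : Int)])) := rfl

theorem grps_cons2 (xs : List String) (a b : Int) (r : List Int) :
    grps xs (a :: b :: r)
      = (PySem.List.slice xs (some (a + 1)) (some b)).map pvChars :: grps xs (b :: r) := by
  simp [grps]

theorem enum_fst_le (xs : List String) (s : Int) :
    ∀ p ∈ PySem.List.enumerate xs s, s ≤ p.1 := by
  induction xs generalizing s with
  | nil => simp [PySem.List.enumerate_nil]
  | cons x xs ih =>
    intro p hp
    rw [PySem.List.enumerate_cons] at hp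
    rcases List.mem_cons.mp hp with rfl | h
    · simp
    · have := ih (s + 1) p h; omega

theorem blanksI_nonneg (xs : List String) : ∀ b ∈ blanksI xs, 0 ≤ b := by
  intro b hb
  simp only [blanksI, List.mem_map, List.mem_filter] at hb
  obtain ⟨p, ⟨hp, _⟩, rfl⟩ := hb
  exact enum_fst_le xs 0 p hp

theorem enum_filter_shift (xs : List String) (s : Int) :
    (((PySem.List.enumerate xs (s + 1)).filter (fun p => PySem.Str.strip p.2 == "")).map (·.1))
      = ((((PySem.List.enumerate xs s).filter (fun p => PySem.Str.strip p.2 == "")).map (·.1)).map (· + 1)) := by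
  induction xs generalizing s with
  | nil => simp [PySem.List.enumerate_nil]
  | cons x xs ih =>
    rw [PySem.List.enumerate_cons, PySem.List.enumerate_cons]
    by_cases hx : PySem.Str.strip x = "" <;>
      simp [hx, ih (s + 1)]

theorem blanksI_cons (x : String) (xs : List String) :
    blanksI (x :: xs)
      = (if PySem.Str.strip x = "" then [(0 : Int)] else []) ++ (blanksI xs).map (· + 1) := by
  unfold blanksI
  rw [PySem.List.enumerate_cons]
  have hsh := enum_filter_shift xs 0
  norm_num at hsh
  by_cases hx : PySem.Str.strip x = "" <;>
    simp [hx, hsh]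

theorem slice_shift (x : String) (xs : List String) (a c : Int) (ha : -1 ≤ a) (hc : 0 ≤ c) :
    PySem.List.slice (x :: xs) (some (a + 1 + 1)) (some (c + 1))
      = PySem.List.slice xs (some (a + 1)) (some c) := by
  rw [PySem.List.slice_toNat _ (by omega) (by omega),
      PySem.List.slice_toNat _ (by omega) hc]
  have h1 : (a + 1 + 1).toNat = (a + 1).toNat + 1 := by omega
  have h2 : (c + 1).toNat - (a + 1 + 1).toNat = c.toNat - (a + 1).toNat := by omega
  rw [h2, h1, List.drop_succ_cons]

theorem slice_cons_zero (x : String) (xs : List String) (c : Int) (hc : 0 ≤ c) :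
    PySem.List.slice (x :: xs) (some 0) (some (c + 1))
      = x :: PySem.List.slice xs (some 0) (some c) := by
  rw [PySem.List.slice_toNat _ (by omega) (by omega),
      PySem.List.slice_toNat _ (by omega) hc]
  have h1 : (c + 1).toNat = c.toNat + 1 := by omega
  simp [h1]

theorem grps_shift (x : String) (xs : List String) (bs : List Int)
    (h1 : ∀ b ∈ bs, -1 ≤ b) (h2 : ∀ c ∈ bs.tail, 0 ≤ c) :
    grps (x :: xs) (bs.map (· + 1)) = grps xs bs := by
  induction bs with
  | nil => simp [grps]
  | cons a r ih =>
    cases r with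
    | nil => simp [grps]
    | cons b r' =>
      rw [List.map_cons, List.map_cons, grps_cons2, grps_cons2]
      have hb : 0 ≤ b := h2 b (by simp)
      have ha : -1 ≤ a := h1 a (by simp)
      rw [slice_shift x xs a b ha hb]
      congr 1
      have := ih (fun z hz => h1 z (List.mem_cons_of_mem _ hz))
        (fun z hz => h2 z (by simp at hz ⊢; tauto))
      simpa using this

theorem parse_alt_eq_spl (xs : List String) : parse_alt xs = spl xs := by
  induction xs with
  | nil => decide
  | cons l ls ih =>
    have hlen : ((l :: ls).length : Int) = (ls.length : Int) + 1 := by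
      simp
    have hnn : ∀ b ∈ blanksI ls ++ [(ls.length : Int)], 0 ≤ b := by
      intro b hb
      rcases List.mem_append.mp hb with h | h
      · exact blanksI_nonneg ls b h
      · simp at h; omega
    have hge : ∀ b ∈ (-1 : Int) :: (blanksI ls ++ [(ls.length : Int)]), -1 ≤ b := by
      intro b hb
      rcases List.mem_cons.mp hb with rfl | hb
      · omega
      · exact le_trans (by norm_num) (hnn b hb)
    rw [parse_alt_eq_grps, blanksI_cons, spl]
    by_cases h : PySem.Str.strip l = ""
    · rw [if_pos h, if_pos h]
      have hb : ((([(0 : Int)]) ++ (blanksI ls).map (· + 1)) ++ [((l :: ls).length : Int)])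
          = (0 : Int) :: ((blanksI ls ++ [(ls.length : Int)]).map (· + 1)) := by
        simp
      rw [hb, grps_cons2]
      have hsl : (PySem.List.slice (l :: ls) (some ((-1 : Int) + 1)) (some 0)).map pvChars
          = ([] : List (List String)) := by
        rw [show ((-1 : Int) + 1) = 0 from by norm_num,
            PySem.List.slice_toNat _ le_rfl le_rfl]
        simp
      rw [hsl]
      congr 1
      rw [show ((0 : Int) :: ((blanksI ls ++ [(ls.length : Int)]).map (· + 1)))
            = (((-1 : Int) :: (blanksI ls ++ [(ls.length : Int)])).map (· + 1)) from by simp,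
          grps_shift l ls _ hge (fun c hc => hnn c hc),
          ← parse_alt_eq_grps, ih]
    · rw [if_neg h, if_neg h]
      obtain ⟨c0, r, ht⟩ :=
        List.exists_cons_of_ne_nil (by simp : blanksI ls ++ [(ls.length : Int)] ≠ [])
      have hc0 : 0 ≤ c0 := hnn c0 (ht ▸ List.mem_cons_self ..)
      have hr : ∀ z ∈ r, 0 ≤ z := fun z hz => hnn z (ht ▸ List.mem_cons_of_mem _ hz)
      have hb : ((([] : List Int) ++ (blanksI ls).map (· + 1)) ++ [((l :: ls).length : Int)])
          = (c0 + 1) :: r.map (· + 1) := by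
        simp only [List.nil_append, hlen]
        rw [show ((blanksI ls).map (· + 1) ++ [(ls.length : Int) + 1])
              = (blanksI ls ++ [(ls.length : Int)]).map (· + 1) from by simp, ht,
            List.map_cons]
      rw [hb, grps_cons2]
      have hsl : PySem.List.slice (l :: ls) (some ((-1 : Int) + 1)) (some (c0 + 1))
          = l :: PySem.List.slice ls (some 0) (some c0) := by
        rw [show ((-1 : Int) + 1) = 0 from by norm_num]
        exact slice_cons_zero l ls c0 hc0
      rw [hsl]
      have hrest : grps (l :: ls) ((c0 + 1) :: r.map (· + 1)) = grps ls (c0 :: r) := by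
        have := grps_shift l ls (c0 :: r)
          (by intro b hb'; rcases List.mem_cons.mp hb' with rfl | hb'
              · omega
              · exact le_trans (by norm_num) (hr b hb'))
          (by intro c hc; exact hr c hc)
        simpa using this
      rw [hrest]
      have halt : spl ls = (PySem.List.slice ls (some ((-1 : Int) + 1)) (some c0)).map pvChars
          :: grps ls (c0 :: r) := by
        rw [← ih, parse_alt_eq_grps, ht, grps_cons2]
      rw [show ((-1 : Int) + 1) = 0 from by norm_num] at halt
      rw [halt]
      simp

-- ===== VERDICT (by name: the statement is the Claim_ definition above) =====
theorem parse_spec : Claim_equal_parse := by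
  intro lines _
  unfold Spec_parse
  rw [parse_eq_spl, parse_alt_eq_spl]
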